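-- pv_equiv track=rewrite | github.com/pypi-data/pypi-mirror-373 | packages/skais-mapper/skais_mapper-0.1.15-cp312-cp312-manylinux2014_x86_64.manylinux_2_17_x86_64.manylinux_2_28_x86_64.whl/skais_mapper/utils/primes.py | _is_lucas_prp
-- ===== SOURCE A (Python) =====
-- def _is_lucas_prp(n: int, D: int) -> bool:
--     """Lucas probable prime."""
--     Q = (1 - D) >> 2
--
--     # n+1 = 2**r*s where s is odd
--     s = n + 1
--     r = 0
--     while s & 1 == 0:
--         r += 1
--         s >>= 1
--
--     # calculate the bit reversal of (odd) s
--     # e.g. 19 (10011) <=> 25 (11001)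
--     t = 0
--     while s > 0:
--         if s & 1:
--             t += 1
--             s -= 1
--         else:
--             t <<= 1
--             s >>= 1
--
--     # use the same bit reversal process to calculate the s-th Lucas number
--     # keep track of q = Q**n as we go
--     U = 0
--     V = 2
--     q = 1
--     # mod_inv(2, n)
--     inv_2 = (n + 1) >> 1
--     while t > 0:
--         if t & 1 == 1:
--             # U, V of n+1
--             U, V = ((U + V) * inv_2) % n, ((D * U + V) * inv_2) % n
--             q = (q * Q) % n
--             t -= 1
--         else:
--             # U, V of n*2
--             U, V = (U * V) % n, (V * V - 2 * q) % n
--             q = (q * q) % n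
--             t >>= 1
--
--     # double s until we have the 2**r*sth Lucas number
--     while r > 0:
--         U, V = (U * V) % n, (V * V - 2 * q) % n
--         q = (q * q) % n
--         r -= 1
--
--     # primality check
--     # if n is prime, n divides the n+1st Lucas number, given the assumptions
--     return U == 0
-- ===== SOURCE B (Python) =====
-- def _is_lucas_prp(n: int, D: int) -> bool:
--     """Lucas probable prime, via a top-down recursion on the chain index.
--
--     No 2-adic factoring of n+1, no bit reversal, no bit list: chain(m)
--     returns (U_m, V_m, Q^m) of the Lucas chain directly by recursion on
--     m -> m >> 1 (doubling step, plus an index+1 step when m is odd).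
--     """
--     Q = (1 - D) >> 2
--     inv_2 = (n + 1) >> 1
--
--     def chain(m):
--         if m <= 0:
--             return 0, 2, 1
--         U, V, q = chain(m >> 1)
--         if m > 1:
--             U, V, q = (U * V) % n, (V * V - 2 * q) % n, (q * q) % n
--         if m & 1:
--             U, V, q = ((U + V) * inv_2) % n, ((D * U + V) * inv_2) % n, (q * Q) % n
--         return U, V, q
--
--     U, _, _ = chain(n + 1)
--     return U == 0
-- ===== Notes on version B (the rewrite author's own statement) =====
-- stated objective: simpler
-- what changed: Replaces A's three staged loops (factor n+1 into 2^r*s, build the bit reversal of s into t, consume t with interleaved halve/decrement steps, then r extra doublings) by a single top-down recursion chain(m)=step(chain(m>>1)) on the index n+1 itself, with no factoring, no bit reversal and no extra doubling loop.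
import Mathlib
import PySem

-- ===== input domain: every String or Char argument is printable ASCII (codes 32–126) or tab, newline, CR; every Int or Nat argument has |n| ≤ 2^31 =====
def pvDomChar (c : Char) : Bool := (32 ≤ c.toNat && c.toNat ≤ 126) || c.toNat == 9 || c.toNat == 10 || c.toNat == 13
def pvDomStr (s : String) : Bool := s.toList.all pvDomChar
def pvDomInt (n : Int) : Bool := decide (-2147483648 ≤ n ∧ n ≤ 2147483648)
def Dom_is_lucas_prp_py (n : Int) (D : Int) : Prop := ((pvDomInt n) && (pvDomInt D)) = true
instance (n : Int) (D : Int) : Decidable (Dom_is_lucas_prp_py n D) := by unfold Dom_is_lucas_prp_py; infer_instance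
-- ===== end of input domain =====

-- B replaces A's three staged loops (2-adic factoring, bit reversal, t-consumption, r doublings)
-- by a single top-down recursion on the chain index n+1 (objective: simpler, same cost).


-- ===== PORT A =====
-- one index+1 step of the Lucas chain: (U,V,q) at index k ↦ index k+1 (A's "U, V of n+1" branch)
def pvStepP (n D Q inv2 : Int) : Int × Int × Int → Int × Int × Int
  | (U, V, q) =>
    (PySem.Int.mod ((U + V) * inv2) n, PySem.Int.mod ((D * U + V) * inv2) n,
     PySem.Int.mod (q * Q) n)

-- one doubling step of the Lucas chain (A's "U, V of n*2" branch)
def pvStepD (n : Int) : Int × Int × Int → Int × Int × Int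
  | (U, V, q) =>
    (PySem.Int.mod (U * V) n, PySem.Int.mod (V * V - 2 * q) n, PySem.Int.mod (q * q) n)

-- `while s & 1 == 0: r += 1; s >>= 1`; the guard `s ≠ 0` only makes the port total
-- (Python diverges exactly at s = 0, which Pre_ excludes as n = -1)
def pvFact (s r : Int) : Int × Int :=
  if h : s ≠ 0 ∧ PySem.Int.mod s 2 = 0 then pvFact (PySem.Int.floordiv s 2) (r + 1) else (s, r)
termination_by s.natAbs
decreasing_by
  rw [PySem.Int.floordiv_eq_ediv_of_pos (by norm_num)]
  rw [PySem.Int.mod_eq_emod_of_pos (by norm_num)] at h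
  omega

-- A's bit-reversal loop: `while s > 0: if s & 1: t += 1; s -= 1 else: t <<= 1; s >>= 1`
def pvRev (s t : Int) : Int :=
  if h : 0 < s then
    if PySem.Int.mod s 2 ≠ 0 then pvRev (s - 1) (t + 1) else pvRev (PySem.Int.floordiv s 2) (t * 2)
  else t
termination_by s.toNat
decreasing_by
  · omega
  · rw [PySem.Int.floordiv_eq_ediv_of_pos (by norm_num)]; omega

-- A's consumption loop over t
def pvTloop (n D Q inv2 t : Int) (st : Int × Int × Int) : Int × Int × Int :=
  if h : 0 < t then
    if PySem.Int.mod t 2 = 1 then pvTloop n D Q inv2 (t - 1) (pvStepP n D Q inv2 st)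
    else pvTloop n D Q inv2 (PySem.Int.floordiv t 2) (pvStepD n st)
  else st
termination_by t.toNat
decreasing_by
  · omega
  · rw [PySem.Int.floordiv_eq_ediv_of_pos (by norm_num)]; omega

-- A's final `while r > 0` doubling loop
def pvRloop (n r : Int) (st : Int × Int × Int) : Int × Int × Int :=
  if h : 0 < r then pvRloop n (r - 1) (pvStepD n st) else st
termination_by r.toNat
decreasing_by omega

def is_lucas_prp_py (n : Int) (D : Int) : Bool :=
  let Q := PySem.Int.floordiv (1 - D) 4
  let sr := pvFact (n + 1) 0
  let t := pvRev sr.1 0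
  let inv2 := PySem.Int.floordiv (n + 1) 2
  let st := pvTloop n D Q inv2 t (0, 2, 1)
  let st2 := pvRloop n sr.2 st
  decide (st2.1 = 0)

-- ===== PORT B =====
-- B's inner `chain(m)`: top-down recursion on m >> 1, arithmetic inline as in Source B
def pvChainB (n D Q inv2 m : Int) : Int × Int × Int :=
  if h : 0 < m then
    let st := pvChainB n D Q inv2 (PySem.Int.floordiv m 2)
    let st2 := if 1 < m then
        (PySem.Int.mod (st.1 * st.2.1) n, PySem.Int.mod (st.2.1 * st.2.1 - 2 * st.2.2) n,
         PySem.Int.mod (st.2.2 * st.2.2) n)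
      else st
    if PySem.Int.mod m 2 ≠ 0 then
      (PySem.Int.mod ((st2.1 + st2.2.1) * inv2) n, PySem.Int.mod ((D * st2.1 + st2.2.1) * inv2) n,
       PySem.Int.mod (st2.2.2 * Q) n)
    else st2
  else (0, 2, 1)
termination_by m.toNat
decreasing_by rw [PySem.Int.floordiv_eq_ediv_of_pos (by norm_num)]; omega

def is_lucas_prp_py_alt (n : Int) (D : Int) : Bool :=
  let Q := PySem.Int.floordiv (1 - D) 4
  let inv2 := PySem.Int.floordiv (n + 1) 2
  decide ((pvChainB n D Q inv2 (n + 1)).1 = 0)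

-- ===== PRECONDITION & SPEC =====
-- Pre_ excludes only n = 0 (A raises ZeroDivisionError in `% n`) and n = -1 (A's first loop
-- `while s & 1 == 0: s >>= 1` diverges on s = 0); A returns no value on either.
def Pre_is_lucas_prp_py (n : Int) (D : Int) : Prop := n ≠ 0 ∧ n ≠ -1
instance (n : Int) (D : Int) : Decidable (Pre_is_lucas_prp_py n D) := by
  unfold Pre_is_lucas_prp_py; infer_instance
def pvWitness_is_lucas_prp_py : Int × Int := (11, 5)

def Spec_is_lucas_prp_py (n : Int) (D : Int) (out : Bool) : Prop := out = is_lucas_prp_py_alt n D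
instance (n : Int) (D : Int) (out : Bool) : Decidable (Spec_is_lucas_prp_py n D out) := by
  unfold Spec_is_lucas_prp_py; infer_instance

-- ===== CLAIM (what is proved, stated in full; the proofs are below) =====
def Claim_equal_is_lucas_prp_py : Prop := ∀ (n : Int) (D : Int), Dom_is_lucas_prp_py n D → Pre_is_lucas_prp_py n D → Spec_is_lucas_prp_py n D (is_lucas_prp_py n D)

-- ===== LEMMAS AND PROOFS =====

-- the MSB-first Lucas ladder as a recursion on s (the common semantics of both programs)
def pvChain (n D Q inv2 s : Int) (st : Int × Int × Int) : Int × Int × Int :=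
  if h : 1 < s then
    if PySem.Int.mod s 2 = 1 then
      pvStepP n D Q inv2 (pvStepD n (pvChain n D Q inv2 (PySem.Int.floordiv s 2) st))
    else pvStepD n (pvChain n D Q inv2 (PySem.Int.floordiv s 2) st)
  else if s = 1 then pvStepP n D Q inv2 st else st
termination_by s.toNat
decreasing_by
  all_goals rw [PySem.Int.floordiv_eq_ediv_of_pos (by norm_num)]; omega

theorem pvFact_odd (s r : Int) (hs : s ≠ 0) :
    (pvFact s r).1 ≠ 0 ∧ PySem.Int.mod (pvFact s r).1 2 ≠ 0 := by
  rw [pvFact]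
  split_ifs with h
  · refine pvFact_odd _ _ ?_
    rw [PySem.Int.floordiv_eq_ediv_of_pos (by norm_num)]
    rw [PySem.Int.mod_eq_emod_of_pos (by norm_num)] at h
    omega
  · exact ⟨hs, fun hm => h ⟨hs, hm⟩⟩
termination_by s.natAbs
decreasing_by
  rw [PySem.Int.floordiv_eq_ediv_of_pos (by norm_num)]
  rw [PySem.Int.mod_eq_emod_of_pos (by norm_num)] at h
  omega

theorem pvFact_sign (s r : Int) (hs : 0 < s) : 0 < (pvFact s r).1 := by
  rw [pvFact]
  split_ifs with h
  · refine pvFact_sign _ _ ?_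
    rw [PySem.Int.floordiv_eq_ediv_of_pos (by norm_num)]
    rw [PySem.Int.mod_eq_emod_of_pos (by norm_num)] at h
    omega
  · exact hs
termination_by s.natAbs
decreasing_by
  rw [PySem.Int.floordiv_eq_ediv_of_pos (by norm_num)]
  rw [PySem.Int.mod_eq_emod_of_pos (by norm_num)] at h
  omega

theorem pvFact_neg (s r : Int) (hs : s < 0) : (pvFact s r).1 < 0 := by
  rw [pvFact]
  split_ifs with h
  · refine pvFact_neg _ _ ?_
    rw [PySem.Int.floordiv_eq_ediv_of_pos (by norm_num)]
    omega
  · exact hs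
termination_by s.natAbs
decreasing_by
  rw [PySem.Int.floordiv_eq_ediv_of_pos (by norm_num)]
  rw [PySem.Int.mod_eq_emod_of_pos (by norm_num)] at h
  omega

theorem pvTloop_rev (n D Q inv2 s t : Int) (st : Int × Int × Int) (hs : 0 < s)
    (ht0 : 0 ≤ t) (hte : PySem.Int.mod t 2 = 0) (halt : 0 < t ∨ PySem.Int.mod s 2 = 1) :
    pvTloop n D Q inv2 (pvRev s t) st = pvTloop n D Q inv2 t (pvChain n D Q inv2 s st) := by
  rw [PySem.Int.mod_eq_emod_of_pos (by norm_num)] at hte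
  by_cases h1 : s = 1
  · subst h1
    rw [pvRev]
    simp only [hs, dite_true]
    rw [show PySem.Int.mod 1 2 = 1 from by decide]
    simp only [ne_eq, one_ne_zero, not_false_eq_true, if_true]
    rw [pvRev]
    norm_num
    rw [pvChain]
    norm_num
    conv_lhs => rw [pvTloop]
    have h01 : (0:Int) < t + 1 := by omega
    have hm : PySem.Int.mod (t + 1) 2 = 1 := by
      rw [PySem.Int.mod_eq_emod_of_pos (by norm_num)]; omega
    simp only [h01, dite_true, hm, if_true]
    norm_num
  · by_cases hodd : PySem.Int.mod s 2 = 1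
    · -- s odd > 1
      have hs1 : 1 < s := by
        rcases lt_or_eq_of_le (by omega : (1:Int) ≤ s) with h | h
        · exact h
        · exact absurd h.symm h1
      rw [PySem.Int.mod_eq_emod_of_pos (by norm_num)] at hodd
      conv_lhs => rw [pvRev]
      simp only [hs, dite_true]
      rw [show PySem.Int.mod s 2 = 1 from by rw [PySem.Int.mod_eq_emod_of_pos (by norm_num)]; exact hodd]
      simp only [ne_eq, one_ne_zero, not_false_eq_true, if_true]
      conv_lhs => rw [pvRev]
      have hsm1 : 0 < s - 1 := by omega
      simp only [hsm1, dite_true]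
      have hm0 : PySem.Int.mod (s - 1) 2 ≠ 0 → False := fun hc => by
        rw [PySem.Int.mod_eq_emod_of_pos (by norm_num)] at hc; omega
      rw [if_neg (by intro hc; exact hm0 hc)]
      have hd : PySem.Int.floordiv (s - 1) 2 = PySem.Int.floordiv s 2 := by
        rw [PySem.Int.floordiv_eq_ediv_of_pos (by norm_num),
            PySem.Int.floordiv_eq_ediv_of_pos (by norm_num)]
        omega
      rw [hd]
      have hhalf : 0 < PySem.Int.floordiv s 2 := by
        rw [PySem.Int.floordiv_eq_ediv_of_pos (by norm_num)]; omega
      rw [pvTloop_rev n D Q inv2 (PySem.Int.floordiv s 2) ((t + 1) * 2) st hhalf (by omega)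
          (by rw [PySem.Int.mod_eq_emod_of_pos (by norm_num)]; omega) (Or.inl (by omega))]
      conv_lhs => rw [pvTloop]
      have h20 : (0:Int) < (t + 1) * 2 := by omega
      simp only [h20, dite_true]
      rw [if_neg (by rw [PySem.Int.mod_eq_emod_of_pos (by norm_num)]; omega)]
      have hdd : PySem.Int.floordiv ((t + 1) * 2) 2 = t + 1 := by
        rw [PySem.Int.floordiv_eq_ediv_of_pos (by norm_num)]; omega
      rw [hdd]
      conv_lhs => rw [pvTloop]
      have h10 : (0:Int) < t + 1 := by omega
      simp only [h10, dite_true]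
      rw [if_pos (by rw [PySem.Int.mod_eq_emod_of_pos (by norm_num)]; omega)]
      norm_num
      conv_rhs => rw [pvChain]
      simp only [hs1, dite_true]
      rw [if_pos (by rw [PySem.Int.mod_eq_emod_of_pos (by norm_num)]; exact hodd)]
      rw [show PySem.Int.floordiv s 2 = s / 2 from
        PySem.Int.floordiv_eq_ediv_of_pos (by norm_num)]
    · -- s even > 0, so 0 < t
      have hodd' : s % 2 = 0 := by
        rw [PySem.Int.mod_eq_emod_of_pos (by norm_num)] at hodd; omega
      have htp : 0 < t := by
        rcases halt with h | h
        · exact h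
        · exact absurd h hodd
      have hs2 : 2 ≤ s := by omega
      conv_lhs => rw [pvRev]
      simp only [hs, dite_true]
      rw [if_neg (by
        rw [PySem.Int.mod_eq_emod_of_pos (by norm_num)]
        simp [hodd'])]
      have hhalf : 0 < PySem.Int.floordiv s 2 := by
        rw [PySem.Int.floordiv_eq_ediv_of_pos (by norm_num)]; omega
      rw [pvTloop_rev n D Q inv2 (PySem.Int.floordiv s 2) (t * 2) st hhalf (by omega)
          (by rw [PySem.Int.mod_eq_emod_of_pos (by norm_num)]; omega) (Or.inl (by omega))]
      conv_lhs => rw [pvTloop]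
      have h20 : (0:Int) < t * 2 := by omega
      simp only [h20, dite_true]
      rw [if_neg (by rw [PySem.Int.mod_eq_emod_of_pos (by norm_num)]; omega)]
      have hdd : PySem.Int.floordiv (t * 2) 2 = t := by
        rw [PySem.Int.floordiv_eq_ediv_of_pos (by norm_num)]; omega
      rw [hdd]
      conv_rhs => rw [pvChain]
      have hs1 : 1 < s := by omega
      simp only [hs1, dite_true]
      rw [if_neg (by
        rw [PySem.Int.mod_eq_emod_of_pos (by norm_num)]
        simp [hodd'])]
termination_by s.toNat
decreasing_by
  all_goals rw [PySem.Int.floordiv_eq_ediv_of_pos (by norm_num)]; omega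

-- B's recursion computes the MSB-first ladder from the initial state
theorem pvChainB_eq_chain (n D Q inv2 m : Int) :
    pvChainB n D Q inv2 m = pvChain n D Q inv2 m (0, 2, 1) := by
  by_cases hm : 0 < m
  · by_cases h1 : 1 < m
    · have hrec := pvChainB_eq_chain n D Q inv2 (PySem.Int.floordiv m 2)
      have hemod : PySem.Int.mod m 2 = m % 2 := PySem.Int.mod_eq_emod_of_pos (by norm_num)
      rw [pvChainB, pvChain]
      simp only [hm, h1, dite_true, if_true, hrec]
      by_cases hodd : m % 2 = 1
      · rw [if_pos (by rw [hemod]; omega), if_pos (by rw [hemod]; exact hodd)]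
        rfl
      · rw [if_neg (by rw [hemod]; omega), if_neg (by rw [hemod]; omega)]
        rfl
    · have hm1 : m = 1 := by omega
      subst hm1
      rw [pvChainB, pvChain]
      rw [show pvChainB n D Q inv2 (PySem.Int.floordiv 1 2) = (0, 2, 1) from by
        rw [show PySem.Int.floordiv 1 2 = 0 from by decide, pvChainB]; norm_num]
      norm_num
      simp [pvStepP]
  · rw [pvChainB, pvChain]
    simp only [hm, dite_false]
    have h1 : ¬ (1 : Int) < m := by omega
    have h2 : m ≠ 1 := by omega
    simp [h1, h2]
termination_by m.toNat
decreasing_by rw [PySem.Int.floordiv_eq_ediv_of_pos (by norm_num)]; omega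

-- A's factoring + final doubling loop together compute the chain at the full index
theorem pvRloop_fact (n D Q inv2 m r : Int) (hm : 0 < m) (hr : 0 ≤ r) :
    pvRloop n (pvFact m r).2 (pvChain n D Q inv2 (pvFact m r).1 (0, 2, 1)) =
      pvRloop n r (pvChain n D Q inv2 m (0, 2, 1)) := by
  rw [pvFact]
  split_ifs with h
  · have hm0 : m % 2 = 0 := by
      rw [PySem.Int.mod_eq_emod_of_pos (by norm_num)] at h; exact h.2
    have hhalf : 0 < PySem.Int.floordiv m 2 := by
      rw [PySem.Int.floordiv_eq_ediv_of_pos (by norm_num)]; omega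
    rw [pvRloop_fact n D Q inv2 (PySem.Int.floordiv m 2) (r + 1) hhalf (by omega)]
    conv_lhs => rw [pvRloop]
    have h1 : (0:Int) < r + 1 := by omega
    simp only [h1, dite_true]
    norm_num
    conv_rhs => rw [pvChain]
    have hm1 : 1 < m := by omega
    simp only [hm1, dite_true]
    rw [if_neg (by rw [PySem.Int.mod_eq_emod_of_pos (by norm_num)]; omega)]
    rw [PySem.Int.floordiv_eq_ediv_of_pos (show (0:Int) < 2 from by norm_num)]
  · rfl
termination_by m.natAbs
decreasing_by
  rw [PySem.Int.floordiv_eq_ediv_of_pos (by norm_num)]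
  rw [PySem.Int.mod_eq_emod_of_pos (by norm_num)] at h
  omega

-- the first component stays 0 through A's doubling loop (n ≠ 0)
theorem pvRloop_fst_zero (n r : Int) (st : Int × Int × Int) (hn : n ≠ 0) (h0 : st.1 = 0) :
    (pvRloop n r st).1 = 0 := by
  rw [pvRloop]
  split_ifs with h
  · refine pvRloop_fst_zero n (r - 1) _ hn ?_
    obtain ⟨U, V, q⟩ := st
    simp only at h0
    subst h0
    simp [pvStepD, PySem.Int.mod, hn]
  · exact h0
termination_by r.toNat
decreasing_by omega

-- ===== VERDICT (by name: the statement is the Claim_ definition above) =====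
theorem is_lucas_prp_py_spec : Claim_equal_is_lucas_prp_py := by
  intro n D _hdom hpre
  unfold Spec_is_lucas_prp_py is_lucas_prp_py is_lucas_prp_py_alt
  dsimp only
  rw [pvChainB_eq_chain]
  have hne : n + 1 ≠ 0 := by
    intro h; exact hpre.2 (by omega)
  by_cases hm : 0 < n + 1
  · -- n ≥ 1: both sides compute the chain at index n+1
    set Q := PySem.Int.floordiv (1 - D) 4
    set inv2 := PySem.Int.floordiv (n + 1) 2
    obtain ⟨hs0, hsodd⟩ := pvFact_odd (n + 1) 0 hne
    have hs : 0 < (pvFact (n + 1) 0).1 := pvFact_sign (n + 1) 0 hm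
    have hm1 : PySem.Int.mod (pvFact (n + 1) 0).1 2 = 1 := by
      rw [PySem.Int.mod_eq_emod_of_pos (by norm_num)] at hsodd ⊢
      omega
    rw [pvTloop_rev n D Q inv2 (pvFact (n + 1) 0).1 0 (0, 2, 1) hs le_rfl (by decide)
        (Or.inr hm1)]
    rw [show pvTloop n D Q inv2 0 (pvChain n D Q inv2 (pvFact (n + 1) 0).1 (0, 2, 1)) =
        pvChain n D Q inv2 (pvFact (n + 1) 0).1 (0, 2, 1) from by rw [pvTloop]; norm_num]
    rw [pvRloop_fact n D Q inv2 (n + 1) 0 hm le_rfl]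
    rw [show pvRloop n 0 (pvChain n D Q inv2 (n + 1) (0, 2, 1)) =
        pvChain n D Q inv2 (n + 1) (0, 2, 1) from by rw [pvRloop]; norm_num]
  · -- n ≤ -2: A's U stays 0 through every loop, and B's recursion bottoms out at once
    have hneg : n + 1 < 0 := by omega
    have hsneg : (pvFact (n + 1) 0).1 < 0 := pvFact_neg (n + 1) 0 hneg
    have hrev : pvRev (pvFact (n + 1) 0).1 0 = 0 := by
      rw [pvRev]; simp [show ¬ (0:Int) < (pvFact (n + 1) 0).1 from by omega]
    rw [hrev]
    rw [show ∀ st, pvTloop n D (PySem.Int.floordiv (1 - D) 4)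
        (PySem.Int.floordiv (n + 1) 2) 0 st = st from fun st => by rw [pvTloop]; norm_num]
    have hn0 : n ≠ 0 := hpre.1
    have hA := pvRloop_fst_zero n (pvFact (n + 1) 0).2 ((0 : Int), (2 : Int), (1 : Int)) hn0 rfl
    rw [hA]
    rw [pvChain]
    simp [show ¬ (1:Int) < n + 1 from by omega, show n + 1 ≠ 1 from by omega]
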